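-- pv_equiv track=rewrite | github.com/malcolmang/CS3245_Homework-2 | QueryParser.py | replace_brackets
-- ===== SOURCE A (Python) =====
-- def replace_brackets(query, bracket_queries):
--     '''
--     replace the items between brackets in tokenized query with consolidated ones
--     '''
--     flat_query = []
--     bracket_index = 0
--     in_bracket = False
--     for token in query:
--         if token[0] == ')':
--             in_bracket = False
--             continue
--         elif in_bracket:
--             continue
--
--         if token[0] == '(':
--             flat_query.append(bracket_queries[bracket_index])
--             bracket_index += 1
--             in_bracket = True
--         else:
--             flat_query.append(token)
--     return flat_query
-- ===== SOURCE B (Python) =====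
-- def replace_brackets(query, bracket_queries):
--     '''
--     replace the items between brackets in tokenized query with consolidated ones
--     '''
--     firsts = [token[0] for token in query]
--     n = len(query)
--     out = []
--     bi = 0
--     i = 0
--     while True:
--         try:
--             o = firsts.index('(', i)
--         except ValueError:
--             out.extend(query[j] for j in range(i, n) if firsts[j] != ')')
--             return out
--         out.extend(query[j] for j in range(i, o) if firsts[j] != ')')
--         out.append(bracket_queries[bi])
--         bi += 1
--         try:
--             i = firsts.index(')', o + 1) + 1
--         except ValueError:
--             return out
-- ===== Notes on version B (the rewrite author's own statement) =====
-- stated objective: alternative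
-- what changed: Replaced A's per-token flag-carrying state machine with a staged approach: precompute the first-character list once, then jump between bracket groups with list.index searches and emit the in-between segments as filtered slices.
import Mathlib
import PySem

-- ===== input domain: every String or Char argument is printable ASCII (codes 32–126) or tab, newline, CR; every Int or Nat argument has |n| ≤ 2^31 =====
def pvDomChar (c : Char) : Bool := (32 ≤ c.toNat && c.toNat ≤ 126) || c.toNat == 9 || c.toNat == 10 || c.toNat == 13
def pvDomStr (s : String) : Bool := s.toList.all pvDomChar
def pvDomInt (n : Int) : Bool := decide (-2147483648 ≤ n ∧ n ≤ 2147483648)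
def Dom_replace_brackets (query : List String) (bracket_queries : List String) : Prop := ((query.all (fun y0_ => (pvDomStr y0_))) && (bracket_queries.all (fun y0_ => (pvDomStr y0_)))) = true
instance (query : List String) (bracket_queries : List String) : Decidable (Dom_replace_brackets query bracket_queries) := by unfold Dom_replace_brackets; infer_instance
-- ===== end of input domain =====

-- B replaces A's per-token flag state machine by a staged approach: precompute the list of
-- first characters, then jump between bracket groups with index searches and emit the
-- in-between segments as filtered slices (objective: alternative decomposition, same cost).

-- ===== PORT A =====
-- loop body of A's for-loop; state = (flat_query, bracket_index, in_bracket)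
def aStep (bracket_queries : List String) (st : List String × Nat × Bool) (token : String) :
    List String × Nat × Bool :=
  let (flat, bi, inb) := st
  if PySem.Str.pyGet? token 0 = some ')' then (flat, bi, false)     -- token[0] == ')' (none on empty token = IndexError, excluded by Pre_)
  else if inb then (flat, bi, inb)
  else if PySem.Str.pyGet? token 0 = some '(' then
    ((flat ++ [(PySem.List.pyGet? bracket_queries (Int.ofNat bi)).getD ""]), bi + 1, true)  -- bracket_queries[bi]; none = IndexError, excluded by Pre_
  else (flat ++ [token], bi, inb)

def replace_brackets (query : List String) (bracket_queries : List String) : List String :=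
  (query.foldl (aStep bracket_queries) ([], 0, false)).1

-- ===== PORT B =====
-- token[0] (none = IndexError on an empty token, excluded by Pre_)
def pvFirst (t : String) : Option Char := PySem.Str.pyGet? t 0

-- port of list.index(c, i) on firsts: first index ≥ i holding c, none = ValueError
def idxOf' (c : Option Char) : List (Option Char) → Option Nat
  | [] => none
  | x :: xs => if x = c then some 0 else (idxOf' c xs).map (· + 1)

def findFrom (firsts : List (Option Char)) (c : Char) (i : Nat) : Option Nat :=
  (idxOf' (some c) (firsts.drop i)).map (· + i)

-- 'query[j] for j in range(..) if firsts[j] != ')'' over a slice of query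
def keepSeg (seg : List String) : List String :=
  seg.filter (fun t => !(pvFirst t == some ')'))

-- Source B's outer while loop; fuel bounds the number of iterations (i strictly grows each round)
def bLoop (bq query : List String) (firsts : List (Option Char)) :
    Nat → Nat → Nat → List String
  | 0, _, _ => []
  | fuel + 1, i, bi =>
    match findFrom firsts '(' i with
    | none => keepSeg (query.drop i)
    | some o =>
      keepSeg ((query.drop i).take (o - i)) ++
      ((PySem.List.pyGet? bq (Int.ofNat bi)).getD "") ::
      match findFrom firsts ')' (o + 1) with
      | none => []
      | some c => bLoop bq query firsts fuel (c + 1) (bi + 1)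

def replace_brackets_alt (query : List String) (bracket_queries : List String) : List String :=
  bLoop bracket_queries query (query.map pvFirst) (query.length + 1) 0 0

-- ===== PRECONDITION & SPEC =====
-- number of top-level '('-opened groups (inb = currently inside a group)
def pvGroups : List String → Bool → Nat
  | [], _ => 0
  | t :: rest, inb =>
    if pvFirst t = some ')' then pvGroups rest false
    else if inb then pvGroups rest true
    else if pvFirst t = some '(' then 1 + pvGroups rest true
    else pvGroups rest false

-- A raises IndexError on an empty token (token[0]) and when the top-level groups outnumber
-- bracket_queries (bracket_queries[bracket_index]); Pre_ excludes exactly those inputs.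
def Pre_replace_brackets (query : List String) (bracket_queries : List String) : Prop :=
  (∀ t ∈ query, t ≠ "") ∧ pvGroups query false ≤ bracket_queries.length

instance (query : List String) (bracket_queries : List String) :
    Decidable (Pre_replace_brackets query bracket_queries) := by
  unfold Pre_replace_brackets; infer_instance

def pvWitness_replace_brackets : List String × List String :=
  (["cat", "(", "a", "AND", "b", ")", "dog"], ["X"])

def Spec_replace_brackets (query : List String) (bracket_queries : List String) (out : List String) : Prop := out = replace_brackets_alt query bracket_queries
instance (query : List String) (bracket_queries : List String) (out : List String) : Decidable (Spec_replace_brackets query bracket_queries out) := by unfold Spec_replace_brackets; infer_instance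

-- ===== CLAIM (what is proved, stated in full; the proofs are below) =====
def Claim_equal_replace_brackets : Prop := ∀ (query : List String) (bracket_queries : List String), Dom_replace_brackets query bracket_queries → Pre_replace_brackets query bracket_queries → Spec_replace_brackets query bracket_queries (replace_brackets query bracket_queries)

-- ===== LEMMAS AND PROOFS =====

-- A's recursion, read off from the fold: same branches, output built in front
def aGo (bq : List String) : List String → Nat → Bool → List String
  | [], _, _ => []
  | t :: rest, bi, inb =>
    if pvFirst t = some ')' then aGo bq rest bi false
    else if inb then aGo bq rest bi inb
    else if pvFirst t = some '(' then
      (PySem.List.pyGet? bq (Int.ofNat bi)).getD "" :: aGo bq rest (bi + 1) true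
    else t :: aGo bq rest bi inb

theorem foldl_aStep (bq : List String) (l : List String) :
    ∀ flat bi inb, (l.foldl (aStep bq) (flat, bi, inb)).1 = flat ++ aGo bq l bi inb := by
  induction l with
  | nil => intro flat bi inb; simp [aGo]
  | cons t rest ih =>
    intro flat bi inb
    simp only [List.foldl_cons, aStep, aGo, pvFirst]
    split_ifs <;> simp [ih]

-- inner skip of a bracketed region (A's inb = true phase), for the proof only
def skipGroup : List String → List String
  | [] => []
  | t :: rest => if pvFirst t = some ')' then rest else skipGroup rest

theorem aGo_true (bq : List String) (l : List String) :
    ∀ bi, aGo bq l bi true = aGo bq (skipGroup l) bi false := by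
  induction l with
  | nil => intro bi; simp [skipGroup, aGo]
  | cons t rest ih =>
    intro bi
    simp only [aGo, skipGroup]
    split_ifs <;> simp [ih]

theorem aGo_noparen_prefix (bq : List String) (pre : List String) :
    ∀ rest bi, (∀ t ∈ pre, pvFirst t ≠ some '(') →
      aGo bq (pre ++ rest) bi false = keepSeg pre ++ aGo bq rest bi false := by
  induction pre with
  | nil => intro rest bi _; simp [keepSeg]
  | cons t pre' ih =>
    intro rest bi h
    have ht : pvFirst t ≠ some '(' := h t (by simp)
    have h' : ∀ u ∈ pre', pvFirst u ≠ some '(' := fun u hu => h u (by simp [hu])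
    by_cases hc : pvFirst t = some ')'
    · simp [aGo, hc, keepSeg, ih rest bi h']
    · simp [aGo, hc, ht, keepSeg, ih rest bi h']

theorem skipGroup_noclose (l : List String) (h : ∀ t ∈ l, pvFirst t ≠ some ')') :
    skipGroup l = [] := by
  induction l with
  | nil => simp [skipGroup]
  | cons t rest ih =>
    have := h t (by simp)
    simp [skipGroup, this]
    exact ih fun u hu => h u (by simp [hu])

theorem skipGroup_split (pre : List String) (t : String) (post : List String)
    (hpre : ∀ u ∈ pre, pvFirst u ≠ some ')') (ht : pvFirst t = some ')') :
    skipGroup (pre ++ t :: post) = post := by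
  induction pre with
  | nil => simp [skipGroup, ht]
  | cons u pre' ih =>
    have hu := hpre u (by simp)
    simp [skipGroup, hu]
    exact ih fun v hv => hpre v (by simp [hv])

-- characterization of idxOf' over a mapped list
theorem idxOf'_map_none (v : Option Char) (d : List String) :
    idxOf' v (d.map pvFirst) = none → ∀ t ∈ d, pvFirst t ≠ v := by
  induction d with
  | nil => intro _ t ht; simp at ht
  | cons t rest ih =>
    intro h u hu
    simp only [List.map_cons, idxOf'] at h
    split_ifs at h with he
    rw [Option.map_eq_none_iff] at h
    rcases List.mem_cons.mp hu with hu | hu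
    · subst hu; exact he
    · exact ih h u hu

theorem idxOf'_map_some (v : Option Char) (d : List String) :
    ∀ k, idxOf' v (d.map pvFirst) = some k →
      ∃ pre t post, d = pre ++ t :: post ∧ pre.length = k ∧ pvFirst t = v ∧
        ∀ u ∈ pre, pvFirst u ≠ v := by
  induction d with
  | nil => intro k h; simp [idxOf'] at h
  | cons t rest ih =>
    intro k h
    simp only [List.map_cons, idxOf'] at h
    split_ifs at h with he
    · cases h
      exact ⟨[], t, rest, by simp, rfl, he, by simp⟩
    · cases hi : idxOf' v (rest.map pvFirst) with
      | none => rw [hi] at h; simp at h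
      | some k' =>
        rw [hi] at h
        simp only [Option.map_some, Option.some.injEq] at h
        obtain ⟨pre, u, post, hdq, hlen, hv, hpre⟩ := ih k' hi
        refine ⟨t :: pre, u, post, by simp [hdq], by simp [hlen]; omega, hv, ?_⟩
        intro w hw
        rcases List.mem_cons.mp hw with hw | hw
        · subst hw; exact he
        · exact hpre w hw

-- main invariant: Source B's loop at position i equals A's state machine on the suffix
theorem bLoop_eq_aGo (bq query : List String) :
    ∀ fuel i bi, query.length ≤ fuel + i →
      bLoop bq query (query.map pvFirst) fuel i bi = aGo bq (query.drop i) bi false := by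
  intro fuel
  induction fuel with
  | zero =>
    intro i bi h
    have : query.drop i = [] := List.drop_eq_nil_of_le (by omega)
    simp [bLoop, this, aGo]
  | succ n ih =>
    intro i bi h
    have hdropmap : (query.map pvFirst).drop i = (query.drop i).map pvFirst :=
      (List.map_drop).symm
    set d := query.drop i with hd
    cases hopen : idxOf' (some '(') (d.map pvFirst) with
    | none =>
      have hnop := idxOf'_map_none _ _ hopen
      have hAeq : aGo bq d bi false = keepSeg d := by
        have := aGo_noparen_prefix bq d [] bi hnop
        simpa [aGo] using this
      simp [bLoop, findFrom, hdropmap, hopen, hAeq, ← hd]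
    | some k =>
      obtain ⟨pre, t, post, hsplit, hlen, ht, hpre⟩ := idxOf'_map_some _ _ _ hopen
      have hdlen : k + 1 ≤ d.length := by rw [hsplit]; simp [← hlen]
      have hq : d.length = query.length - i := by rw [hd, List.length_drop]
      have hdk : d.drop (k + 1) = post := by
        rw [hsplit, ← hlen]
        exact List.drop_length_add_append (i := 1) (l₁ := pre) (l₂ := t :: post)
      have hdrop1 : query.drop (k + i + 1) = post := by
        have h1 : d.drop (k + 1) = query.drop (k + 1 + i) := by rw [hd, List.drop_drop]; congr 1; omega
        rw [show k + i + 1 = k + 1 + i by omega, ← h1, hdk]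
      have htake : d.take (k + i - i) = pre := by
        have hki : k + i - i = k := by omega
        rw [hki, hsplit, ← hlen]
        simp
      have htne : pvFirst t ≠ some ')' := by rw [ht]; intro hcon; cases hcon
      have hA : aGo bq d bi false =
          keepSeg pre ++ ((PySem.List.pyGet? bq (Int.ofNat bi)).getD "") ::
            aGo bq (skipGroup post) (bi + 1) false := by
        rw [hsplit, aGo_noparen_prefix bq pre _ bi hpre]
        simp only [aGo]
        rw [if_neg htne, if_neg (by simp), if_pos ht, aGo_true]
      simp only [bLoop, findFrom, hdropmap, hopen, Option.map_some]
      rw [show (query.map pvFirst).drop (k + i + 1) = post.map pvFirst by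
        rw [← List.map_drop, hdrop1]]
      cases hclose : idxOf' (some ')') (post.map pvFirst) with
      | none =>
        have hnc := idxOf'_map_none _ _ hclose
        simp only [Option.map_none]
        rw [hA, skipGroup_noclose post hnc, htake]
        simp [aGo]
      | some k2 =>
        obtain ⟨pre2, t2, post2, hsplit2, hlen2, ht2, hpre2⟩ := idxOf'_map_some _ _ _ hclose
        simp only [Option.map_some]
        have hskip : skipGroup post = post2 := by
          rw [hsplit2]; exact skipGroup_split pre2 t2 post2 hpre2 ht2
        have hlp : query.length ≤ n + (k2 + (k + i + 1) + 1) := by omega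
        rw [ih (k2 + (k + i + 1) + 1) (bi + 1) hlp]
        have hdrop2 : query.drop (k2 + (k + i + 1) + 1) = post2 := by
          have h1 : post.drop (k2 + 1) = query.drop (k2 + 1 + (k + i + 1)) := by
            rw [← hdrop1, List.drop_drop]; congr 1; omega
          have h2 : post.drop (k2 + 1) = post2 := by
            rw [hsplit2, ← hlen2]
            exact List.drop_length_add_append (i := 1) (l₁ := pre2) (l₂ := t2 :: post2)
          rw [show k2 + (k + i + 1) + 1 = k2 + 1 + (k + i + 1) by omega, ← h1, h2]
        rw [hdrop2, hA, hskip, htake]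

-- ===== VERDICT (by name: the statement is the Claim_ definition above) =====
theorem replace_brackets_spec : Claim_equal_replace_brackets := by
  intro query bq _ _
  unfold Spec_replace_brackets replace_brackets replace_brackets_alt
  rw [foldl_aStep, bLoop_eq_aGo bq query (query.length + 1) 0 0 (by omega)]
  simp
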